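-- pv_equiv track=rewrite | github.com/yoonjeong-choi-dev/study-history | ComputerScience/Extra/ImpracticalPythonProjects/Proj2_PalingramTest/main.py | find_palingram_improved
-- ===== SOURCE A (Python) =====
-- def find_palingram_improved(word, word_set):
--     """
--     Set 자료 구조를 이용하여 "in" 연산자 속도 향상
--     :param word: 핵심 단어 후보가 되는 단어
--     :param word_set: 팔린그램을 만들기 위한 단어 Set
--     :return: word가 핵심 단어인 팔린그램 리스트. 없으면 빈 리스트
--     """
--     word_len = len(word)
--     if word_len <= 1:
--         return []
--
--     palingram_list = []
--
--     # 역전 단어의 역전 및 회문 검사를 빠르게 하기 위해 미리 역전시킨다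
--     word_reversed = word[::-1]
--     for i in range(word_len):
--         # word : [회문][역전단어] 형태
--         if word[i:] == word_reversed[:word_len-i] and word_reversed[word_len-i:] in word_set:
--             palingram_list.append((word, word_reversed[word_len-i:]))
--
--         # word : [역전단어][회문] 형태
--         if word[:i] == word_reversed[word_len-i:] and word_reversed[:word_len-i] in word_set:
--             palingram_list.append((word_reversed[:word_len-i], word))
--
--     return palingram_list
-- ===== SOURCE B (Python) =====
-- def _pal_flags(s):
--     # One incremental pass over s: flags[k] tells whether s[:k] is a palindrome
--     # (k = 0..len(s)); also returns the reversed string.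
--     flags = []
--     p = r = ''
--     for ch in s:
--         flags.append(p == r)
--         p += ch
--         r = ch + r
--     flags.append(p == r)
--     return flags, r
--
--
-- def find_palingram_improved(word, word_set):
--     n = len(word)
--     if n <= 1:
--         return []
--     pal_pre, rev = _pal_flags(word)   # pal_pre[i]: word[:i] is a palindrome
--     pal_suf, _ = _pal_flags(rev)      # pal_suf[k]: word[n-k:] is a palindrome
--     out = []
--     rpre = ''      # word[:i] reversed, maintained incrementally
--     rsuf = rev     # word[i:] reversed, maintained incrementally
--     for i in range(n):
--         if pal_suf[n - i] and rpre in word_set: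
--             out.append((word, rpre))
--         if pal_pre[i] and rsuf in word_set:
--             out.append((rsuf, word))
--         rpre = word[i] + rpre
--         rsuf = rsuf[:-1]
--     return out
-- ===== Notes on version B (the rewrite author's own statement) =====
-- stated objective: alternative
-- what changed: Replaces A's per-index slicing and slice comparisons (four fresh slices per loop iteration) by two incremental accumulator scans that tabulate, once, the palindromic-prefix flags and reversed prefixes of the word and of its reverse, so the emission loop only does table lookups and set membership tests.
import Mathlib
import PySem

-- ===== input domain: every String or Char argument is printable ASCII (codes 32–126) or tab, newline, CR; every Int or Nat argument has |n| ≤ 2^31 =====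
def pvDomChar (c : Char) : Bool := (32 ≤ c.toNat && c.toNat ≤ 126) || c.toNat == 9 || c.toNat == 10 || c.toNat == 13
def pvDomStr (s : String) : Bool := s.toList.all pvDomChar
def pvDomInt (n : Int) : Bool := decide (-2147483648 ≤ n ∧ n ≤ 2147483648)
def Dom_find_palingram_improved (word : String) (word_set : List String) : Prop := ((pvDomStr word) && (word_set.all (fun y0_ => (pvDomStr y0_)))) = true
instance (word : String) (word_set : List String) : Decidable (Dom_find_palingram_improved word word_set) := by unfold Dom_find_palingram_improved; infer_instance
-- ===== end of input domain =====

-- B replaces A's per-index slicing and slice comparisons by two incremental scans that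
-- tabulate the palindromic-prefix flags once, plus incrementally maintained reversed
-- prefix/suffix accumulators in the emission loop; objective: alternative.

-- ===== PORT A =====
-- Strings are handled on their code-point lists (List Char, exact for Python str);
-- a Python '==' of two string slices is the corresponding List Char equality.
-- pvStepA is A's loop body, named so the proofs can speak about one iteration.
def pvStepA (word : String) (word_set : List String) (w word_reversed : List Char)
    (word_len : Int) (palingram_list : List (String × String)) (i : Int) :
    List (String × String) :=
  -- word : [palindrome][reversed word]
  let l1 :=
    if (PySem.List.slice w (some i) none == PySem.List.slice word_reversed none (some (word_len - i))) &&
       word_set.contains (String.ofList (PySem.List.slice word_reversed (some (word_len - i)) none))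
    then palingram_list ++ [(word, String.ofList (PySem.List.slice word_reversed (some (word_len - i)) none))]
    else palingram_list
  -- word : [reversed word][palindrome]
  if (PySem.List.slice w none (some i) == PySem.List.slice word_reversed (some (word_len - i)) none) &&
     word_set.contains (String.ofList (PySem.List.slice word_reversed none (some (word_len - i))))
  then l1 ++ [(String.ofList (PySem.List.slice word_reversed none (some (word_len - i))), word)]
  else l1

def find_palingram_improved (word : String) (word_set : List String) : List (String × String) :=
  let w := word.toList
  let word_len : Int := PySem.Str.len word
  if word_len ≤ 1 then []
  else
    -- word[::-1]; a slice with step -1 never raises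
    let word_reversed := (PySem.List.slice? w none none (-1)).getD []
    (PySem.List.pyRange 0 word_len 1).foldl (pvStepA word word_set w word_reversed word_len) []

-- ===== PORT B =====
-- port of Source B's _pal_flags: one incremental pass; entry k of the first component says
-- whether s[:k] is a palindrome (k = 0..len s); second component is the reversed string.
def pvPalFlags (s : List Char) : List Bool × List Char :=
  let st := s.foldl
    (fun (st : List Bool × List Char × List Char) ch =>
      let (flags, p, r) := st
      (flags ++ [p == r], p ++ [ch], ch :: r))
    ([], [], [])
  let (flags, p, r) := st
  (flags ++ [p == r], r)

-- B's loop body, named so the proofs can speak about one iteration;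
-- state: (out, rpre = word[:i] reversed, rsuf = word[i:] reversed)
def pvStepB (word : String) (word_set : List String) (w : List Char)
    (pal_suf pal_pre : List Bool) (n : Int)
    (st : List (String × String) × List Char × List Char) (i : Int) :
    List (String × String) × List Char × List Char :=
  let o1 :=
    if PySem.List.pyGetD pal_suf (n - i) false && word_set.contains (String.ofList st.2.1)
    then st.1 ++ [(word, String.ofList st.2.1)] else st.1
  let o2 :=
    if PySem.List.pyGetD pal_pre i false && word_set.contains (String.ofList st.2.2)
    then o1 ++ [(String.ofList st.2.2, word)] else o1
  -- rpre = word[i] + rpre ; rsuf = rsuf[:-1]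
  (o2, PySem.List.pyGetD w i ' ' :: st.2.1, PySem.List.slice st.2.2 none (some (-1)))

def find_palingram_improved_alt (word : String) (word_set : List String) : List (String × String) :=
  let w := word.toList
  let n : Int := PySem.Str.len word
  if n ≤ 1 then []
  else
    let (pal_pre, rev) := pvPalFlags w
    let (pal_suf, _) := pvPalFlags rev
    ((PySem.List.pyRange 0 n 1).foldl (pvStepB word word_set w pal_suf pal_pre n)
      ([], [], rev)).1

-- ===== PRECONDITION & SPEC =====
def Spec_find_palingram_improved (word : String) (word_set : List String) (out : List (String × String)) : Prop := out = find_palingram_improved_alt word word_set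
instance (word : String) (word_set : List String) (out : List (String × String)) : Decidable (Spec_find_palingram_improved word word_set out) := by unfold Spec_find_palingram_improved; infer_instance

-- ===== CLAIM (what is proved, stated in full; the proofs are below) =====
def Claim_equal_find_palingram_improved : Prop := ∀ (word : String) (word_set : List String), Dom_find_palingram_improved word word_set → Spec_find_palingram_improved word word_set (find_palingram_improved word word_set)

-- ===== LEMMAS AND PROOFS =====

-- closed form of the fold inside pvPalFlags, for an arbitrary starting state
theorem pvPalFlags_foldl (l : List Char) (flags : List Bool) (p r : List Char) :
    l.foldl
      (fun (st : List Bool × List Char × List Char) ch =>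
        let (flags, p, r) := st
        (flags ++ [p == r], p ++ [ch], ch :: r))
      (flags, p, r) =
    (flags ++ (List.range l.length).map (fun k => (p ++ l.take k) == ((l.take k).reverse ++ r)),
     p ++ l, l.reverse ++ r) := by
  induction l generalizing flags p r with
  | nil => simp
  | cons ch t ih =>
    simp only [List.foldl_cons, ih, List.length_cons, List.range_succ_eq_map, List.map_cons,
      List.map_map]
    simp [Function.comp_def, List.take_succ_cons, List.append_assoc]

-- closed form of pvPalFlags
theorem pvPalFlags_eq (s : List Char) :
    pvPalFlags s =
      ((List.range (s.length + 1)).map (fun k => (s.take k) == (s.take k).reverse),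
       s.reverse) := by
  simp [pvPalFlags, pvPalFlags_foldl, List.range_succ]

-- one iteration of B simulates one iteration of A and keeps the loop invariant
theorem pvStep_match (word : String) (word_set : List String) (w : List Char)
    (j : Nat) (hjlt : j < w.length) (out : List (String × String)) :
    pvStepB word word_set w
      ((List.range (w.length + 1)).map
        (fun k => List.take k w.reverse == (List.take k w.reverse).reverse))
      ((List.range (w.length + 1)).map (fun k => List.take k w == (List.take k w).reverse))
      (w.length : Int)
      (out, (w.take j).reverse, (w.drop j).reverse) (j : Int) =
    (pvStepA word word_set w w.reverse (w.length : Int) out (j : Int),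
     (w.take (j + 1)).reverse, (w.drop (j + 1)).reverse) := by
  unfold pvStepA pvStepB
  have hsub : (w.length : Int) - (j : Int) = ((w.length - j : Nat) : Int) := by omega
  rw [hsub]
  simp only [PySem.List.slice_from_natCast, PySem.List.slice_to_natCast,
    PySem.List.pyGetD_natCast, PySem.List.slice_to_neg_one]
  rw [PySem.List.getD_map_range (fun k => List.take k w == (List.take k w).reverse)
        (w.length + 1) j false (by omega),
      PySem.List.getD_map_range
        (fun k => List.take k w.reverse == (List.take k w.reverse).reverse)
        (w.length + 1) (w.length - j) false (by omega),
      List.getD_eq_getElem w ' ' hjlt]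
  have h1 : List.take (w.length - j) w.reverse = (List.drop j w).reverse := by
    rw [List.take_reverse]; congr 2; omega
  have h2 : List.drop (w.length - j) w.reverse = (List.take j w).reverse := by
    rw [List.drop_reverse]; congr 2; omega
  rw [h1, h2]
  have hc : ((List.drop j w).reverse == (List.drop j w).reverse.reverse)
      = (List.drop j w == (List.drop j w).reverse) := by
    rw [List.reverse_reverse, Bool.beq_comm]
  rw [hc]
  have hrp : w[j] :: (w.take j).reverse = (w.take (j + 1)).reverse := by
    rw [List.take_add_one, List.getElem?_eq_getElem hjlt]
    simp only [Option.toList_some, List.reverse_append, List.reverse_singleton,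
      List.singleton_append]
  have hrs : ((w.drop j).reverse).dropLast = (w.drop (j + 1)).reverse := by
    rw [List.drop_eq_getElem_cons hjlt]
    simp
  rw [hrp, hrs]

-- the emission loops of the two ports agree from index j on, given B's loop invariant
theorem pvLoop (word : String) (word_set : List String) (w : List Char) :
    ∀ (d j : Nat), w.length - j = d → j ≤ w.length → ∀ (out : List (String × String)),
    (List.foldl
      (pvStepB word word_set w
        ((List.range (w.length + 1)).map
          (fun k => List.take k w.reverse == (List.take k w.reverse).reverse))
        ((List.range (w.length + 1)).map (fun k => List.take k w == (List.take k w).reverse))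
        (w.length : Int))
      (out, (w.take j).reverse, (w.drop j).reverse)
      (PySem.List.pyRange (j : Int) (w.length : Int) 1)).1
    = List.foldl (pvStepA word word_set w w.reverse (w.length : Int)) out
      (PySem.List.pyRange (j : Int) (w.length : Int) 1) := by
  intro d
  induction d with
  | zero =>
    intro j hd hj out
    rw [PySem.List.pyRange_one_eq_nil (by exact_mod_cast (by omega : w.length ≤ j))]
    simp
  | succ d ih =>
    intro j hd hj out
    have hjlt : j < w.length := by omega
    rw [PySem.List.pyRange_one_cons (by exact_mod_cast hjlt)]
    simp only [List.foldl_cons]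
    rw [pvStep_match word word_set w j hjlt out]
    have hcast : ((j : Int) + 1) = ((j + 1 : Nat) : Int) := by push_cast; ring
    rw [hcast]
    exact ih (j + 1) (by omega) (by omega) _

-- ===== VERDICT (by name: the statement is the Claim_ definition above) =====
theorem find_palingram_improved_spec : Claim_equal_find_palingram_improved := by
  intro word word_set _
  unfold Spec_find_palingram_improved
  unfold find_palingram_improved find_palingram_improved_alt
  simp only [PySem.Str.len_eq, PySem.List.slice?_none_none_neg_one, Option.getD_some,
    pvPalFlags_eq, List.length_reverse]
  by_cases h : ((word.toList.length : Int) ≤ 1)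
  · rw [if_pos h, if_pos h]
  · rw [if_neg h, if_neg h]
    have := pvLoop word word_set word.toList word.toList.length 0 (by omega) (by omega) []
    simpa using this.symm
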